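-- pv_equiv track=rewrite | github.com/marcusl0we/WorkflowDevelopment | Day12.py | cave_not_been_visited
-- ===== SOURCE A (Python) =====
-- def cave_not_been_visited(x: str, path, Part_1_or_2):
--     if Part_1_or_2 == 'Part 1':  # do the conditions for part 1
--         if x.isupper():  # if cave is uppercase, we can visit it multiple times so always return True
--             return True
--         if x.islower():  # if cave is lowercase, we can't visit it multiple times
--             for i in range(len(path)):  # so then check if it is already on path by looping through path
--                 if path[i] == x:
--                     return False  # return False as cave HAS been visited
--             return True
--     if Part_1_or_2 == 'Part 2':  # do the conditions for part 2
--         if x.isupper():  # if cave is uppercase, we can visit it multiple times so always return True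
--             return True
--         if x.islower():
--             if x == 'start' or x == 'end':  # same conditions as before for star and end caves
--                 for i in range(len(path)):
--                     if path[i] == x:
--                         return False
--                 return True
--
--             # Use a dict to keep track of how many times a node appears in path
--             nodes_so_far = list(set(path))  # get unique nodes used so far on path to use as keys
--             node_on_path_occurrences = {element: 0 for element in nodes_so_far}  # initialise each key to zero
--             if x not in nodes_so_far:  # add dict key if node under test hasn't appeared yet and set to zero
--                 node_on_path_occurrences[x] = 0
--             for i in range(len(path)):
--                 node_on_path_occurrences[path[i]] += 1  # count how many times each node appears on path, update dict
--
--             # Flag to tell us whether any small cave has been visited twice already - this can only happen once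
--             small_cave_twice_once = False
--             for key, value in node_on_path_occurrences.items():
--                 if key.islower() and value >= 2 and key != 'start' and key != 'end':  # visited twice already check
--                     small_cave_twice_once = True
--
--             # Check the occurrences of node under test using dict
--             if node_on_path_occurrences[x] == 0:
--                 return True  # if visit counter is zero it hasn't appeared at all yet so can return True
--             if node_on_path_occurrences[x] >= 1:  # if visit counter is one or bigger it has been visited before on path
--                 if small_cave_twice_once:  # so then check if another small cave has already been visited twice
--                     return False  # if there already has been a second visit to small cave return false
--                 else:
--                     return True  # otherwise we can visit that small cave a second time
-- ===== SOURCE B (Python) =====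
-- def cave_not_been_visited(x: str, path, Part_1_or_2):
--     if Part_1_or_2 == 'Part 1':
--         if x.isupper():
--             return True
--         if x.islower():
--             return x not in path
--     elif Part_1_or_2 == 'Part 2':
--         if x.isupper():
--             return True
--         if x.islower():
--             if x == 'start' or x == 'end':
--                 return x not in path
--             # one pass: has any small (non-start/end) cave already been visited twice?
--             seen = set()
--             twice = False
--             for node in path:
--                 if node.islower() and node != 'start' and node != 'end' and node in seen:
--                     twice = True
--                 seen.add(node)
--             if x not in path:
--                 return True
--             return not twice
--     return None
-- ===== Notes on version B (the rewrite author's own statement) =====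
-- stated objective: simpler
-- what changed: Part 1 and the start/end case use a direct 'x in path' membership test instead of the index loop, and Part 2's unique-node list + occurrence dict + dict-items scan is replaced by a single pass over path with a 'seen' set that flags the first repeat of a small cave.
import Mathlib
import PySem

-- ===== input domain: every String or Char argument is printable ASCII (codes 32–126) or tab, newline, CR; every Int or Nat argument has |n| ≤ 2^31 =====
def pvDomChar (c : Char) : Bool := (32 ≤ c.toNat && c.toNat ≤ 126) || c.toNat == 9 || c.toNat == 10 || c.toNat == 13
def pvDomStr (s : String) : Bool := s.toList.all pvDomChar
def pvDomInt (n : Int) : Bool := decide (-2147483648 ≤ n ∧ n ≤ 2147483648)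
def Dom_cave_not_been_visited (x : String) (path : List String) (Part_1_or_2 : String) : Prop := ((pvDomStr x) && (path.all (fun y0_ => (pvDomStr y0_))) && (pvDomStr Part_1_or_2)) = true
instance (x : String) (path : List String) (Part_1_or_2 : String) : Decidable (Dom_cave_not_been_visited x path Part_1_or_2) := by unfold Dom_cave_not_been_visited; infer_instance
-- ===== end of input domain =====

-- B replaces A's unique-list + occurrence-dict + dict-items scan by a single pass over the path
-- with a 'seen' set; objective: simpler. Neither version mutates its arguments.

-- str.isupper(): at least one cased character and no lowercase one (exact on the ASCII domain)
def pyIsupper (s : String) : Bool :=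
  (s.toList.any fun c => PySem.Chars.isalpha c) && (s.toList.all fun c => !PySem.Chars.islower c)

-- str.islower(): at least one cased character and no uppercase one (exact on the ASCII domain)
def pyIslower (s : String) : Bool :=
  (s.toList.any fun c => PySem.Chars.isalpha c) && (s.toList.all fun c => !PySem.Chars.isupper c)

-- ===== PORT A =====
-- A's 'for i in range(len(path)): if path[i] == x: return False / return True' loop
def scanPathA (x : String) : List String → Bool
  | [] => true
  | p :: ps => if p == x then false else scanPathA x ps

-- A's Part-2 lowercase/non-start-end block (unique nodes, occurrence dict, dict-items scan)
def caveBody2A (x : String) (path : List String) : Option Bool :=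
  let nodes_so_far : PySem.Set String := PySem.Set.ofList path
  let d0 : PySem.Dict String Int :=
    nodes_so_far.foldl (fun d e => d.insert e 0) PySem.Dict.empty
  let d1 : PySem.Dict String Int :=
    if !(PySem.Set.contains nodes_so_far x) then d0.insert x 0 else d0
  let d : PySem.Dict String Int := path.foldl (fun d p => d.modify p 0 (· + 1)) d1
  let small_cave_twice_once : Bool :=
    d.items.foldl (fun acc kv =>
      if pyIslower kv.1 && decide (2 ≤ kv.2) && !(kv.1 == "start") && !(kv.1 == "end")
      then true else acc) false
  if d.getD x 0 == 0 then some true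
  else if decide (1 ≤ d.getD x 0) then
    (if small_cave_twice_once then some false else some true)
  else none

def cave_not_been_visited (x : String) (path : List String) (Part_1_or_2 : String) : Option Bool :=
  if Part_1_or_2 == "Part 1" then
    if pyIsupper x then some true
    else if pyIslower x then some (scanPathA x path)
    else if Part_1_or_2 == "Part 2" then caveBody2A x path   -- fall-through to the second 'if'
    else none
  else if Part_1_or_2 == "Part 2" then
    if pyIsupper x then some true
    else if pyIslower x then
      if x == "start" || x == "end" then some (scanPathA x path)
      else caveBody2A x path
    else none
  else none

-- ===== PORT B =====
-- B's loop-body condition and one-pass step (seen set + twice flag)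
def smallCond (e : String) : Bool := pyIslower e && !(e == "start") && !(e == "end")

def stepB (st : PySem.Set String × Bool) (node : String) : PySem.Set String × Bool :=
  (PySem.Set.add st.1 node,
   if smallCond node && PySem.Set.contains st.1 node then true else st.2)

def cave_not_been_visited_alt (x : String) (path : List String) (Part_1_or_2 : String) : Option Bool :=
  if Part_1_or_2 == "Part 1" then
    if pyIsupper x then some true
    else if pyIslower x then some (!(path.contains x))
    else none
  else if Part_1_or_2 == "Part 2" then
    if pyIsupper x then some true
    else if pyIslower x then
      if x == "start" || x == "end" then some (!(path.contains x))
      else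
        let st := path.foldl stepB (PySem.Set.empty, false)
        if !(path.contains x) then some true else some (!st.2)
    else none
  else none

-- ===== PRECONDITION & SPEC =====
def Spec_cave_not_been_visited (x : String) (path : List String) (Part_1_or_2 : String) (out : Option Bool) : Prop := out = cave_not_been_visited_alt x path Part_1_or_2
instance (x : String) (path : List String) (Part_1_or_2 : String) (out : Option Bool) : Decidable (Spec_cave_not_been_visited x path Part_1_or_2 out) := by unfold Spec_cave_not_been_visited; infer_instance

-- ===== CLAIM (what is proved, stated in full; the proofs are below) =====
def Claim_equal_cave_not_been_visited : Prop := ∀ (x : String) (path : List String) (Part_1_or_2 : String), Dom_cave_not_been_visited x path Part_1_or_2 → Spec_cave_not_been_visited x path Part_1_or_2 (cave_not_been_visited x path Part_1_or_2)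

-- ===== LEMMAS AND PROOFS =====

theorem scanPathA_eq (x : String) (path : List String) :
    scanPathA x path = !(path.contains x) := by
  induction path with
  | nil => rfl
  | cons p ps ih =>
    simp only [scanPathA, List.contains_cons]
    by_cases h : p = x
    · simp [h]
    · have hx : x ≠ p := fun hh => h hh.symm
      simp [h, hx, ih]

-- the insert-0 initialisation leaves every getD-with-default-0 at 0
theorem getD_foldl_insert_zero (l : List String) (d : PySem.Dict String Int)
    (h : ∀ v, d.getD v 0 = 0) (v : String) :
    (l.foldl (fun d e => d.insert e 0) d).getD v 0 = 0 := by
  induction l generalizing d with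
  | nil => exact h v
  | cons a t ih =>
    refine ih _ (fun w => ?_)
    rw [PySem.Dict.getD_insert]
    split
    · rfl
    · exact h w

theorem mem_update_of_mem_right (s : PySem.Set String) (xs : List String) (e : String)
    (he : e ∈ xs) : e ∈ PySem.Set.update s xs := by
  rw [PySem.Set.update_eq_append_filter]
  by_cases hc : s.contains e = true
  · exact List.mem_append_left _ ((PySem.Set.contains_iff s e).1 hc)
  · refine List.mem_append_right _ ?_
    rw [List.mem_filter]
    have hfalse : s.contains e = false := by
      cases hcc : s.contains e
      · rfl
      · exact absurd hcc hc
    refine ⟨(PySem.Set.mem_ofList xs e).2 he, ?_⟩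
    simp only [Bool.not_eq_eq_eq_not, Bool.not_true]
    exact hfalse

-- A's items-scan accumulator is an 'any'
theorem foldl_if_or {α : Type} (c : α → Bool) (l : List α) (b : Bool) :
    l.foldl (fun acc kv => if c kv then true else acc) b = (b || l.any c) := by
  induction l generalizing b with
  | nil => simp
  | cons a t ih =>
    rw [List.foldl_cons, ih]
    by_cases h : c a = true <;> simp [h]

-- characterisation of B's one-pass 'twice' flag
theorem foldB_char (l : List String) (s : PySem.Set String) (b : Bool) :
    ((l.foldl stepB (s, b)).2 = true) ↔
      (b = true ∨ ∃ e ∈ l, smallCond e = true ∧ (e ∈ s ∨ 2 ≤ List.count e l)) := by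
  induction l generalizing s b with
  | nil => simp
  | cons a t ih =>
    rw [List.foldl_cons]
    show ((t.foldl stepB (PySem.Set.add s a, if smallCond a && PySem.Set.contains s a then true else b)).2 = true) ↔ _
    rw [ih]
    constructor
    · rintro (hb | ⟨e, he, hc, hm⟩)
      · by_cases hca : (smallCond a && PySem.Set.contains s a) = true
        · rw [Bool.and_eq_true, PySem.Set.contains_iff] at hca
          exact Or.inr ⟨a, List.mem_cons_self .., hca.1, Or.inl hca.2⟩
        · rw [if_neg hca] at hb
          exact Or.inl hb
      · rcases hm with hmem | hcount
        · rcases (PySem.Set.mem_add s a e).1 hmem with h | h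
          · exact Or.inr ⟨e, List.mem_cons_of_mem _ he, hc, Or.inl h⟩
          · subst h
            have : 2 ≤ List.count e (e :: t) := by
              rw [List.count_cons_self]
              have := List.count_pos_iff.2 he
              omega
            exact Or.inr ⟨e, List.mem_cons_self .., hc, Or.inr this⟩
        · have : 2 ≤ List.count e (a :: t) := le_trans hcount (List.count_le_count_cons ..)
          exact Or.inr ⟨e, List.mem_cons_of_mem _ he, hc, Or.inr this⟩
    · rintro (hb | ⟨e, he, hc, hm⟩)
      · subst hb; left; split <;> rfl
      · rcases List.mem_cons.1 he with rfl | het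
        · rcases hm with hmem | hcount
          · left
            rw [if_pos]
            rw [Bool.and_eq_true, PySem.Set.contains_iff]
            exact ⟨hc, hmem⟩
          · -- e occurs ≥ 2 times in e :: t, hence ≥ 1 time in t
            have ht : e ∈ t := by
              rw [List.count_cons_self] at hcount
              exact List.count_pos_iff.1 (by omega)
            refine Or.inr ⟨e, ht, hc, Or.inl ?_⟩
            exact (PySem.Set.mem_add s e e).2 (Or.inr rfl)
        · rcases hm with hmem | hcount
          · exact Or.inr ⟨e, het, hc, Or.inl ((PySem.Set.mem_add s a e).2 (Or.inl hmem))⟩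
          · by_cases hea : e = a
            · subst hea
              refine Or.inr ⟨e, het, hc, Or.inl ?_⟩
              exact (PySem.Set.mem_add s e e).2 (Or.inr rfl)
            · refine Or.inr ⟨e, het, hc, Or.inr ?_⟩
              have h' := hcount
              simp only [List.count_cons, beq_iff_eq] at h'
              rw [if_neg (fun hh => hea hh.symm)] at h'
              omega

-- A's Part-2 block with an arbitrary all-zero initial dict computes exactly B's one-pass answer
theorem body2_core (x : String) (path : List String) (d1 : PySem.Dict String Int)
    (hzero1 : ∀ v, d1.getD v 0 = 0) (hnodup1 : d1.keys.Nodup) :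
    (if (path.foldl (fun d p => d.modify p 0 (· + 1)) d1).getD x 0 == 0 then some true
     else if decide (1 ≤ (path.foldl (fun d p => d.modify p 0 (· + 1)) d1).getD x 0) then
       (if (path.foldl (fun d p => d.modify p 0 (· + 1)) d1).items.foldl (fun acc kv =>
            if pyIslower kv.1 && decide (2 ≤ kv.2) && !(kv.1 == "start") && !(kv.1 == "end")
            then true else acc) false
        then some false else some true)
     else none) =
    (if !(path.contains x) then some true
     else some (!(path.foldl stepB (PySem.Set.empty, false)).2)) := by
  have hcount : ∀ v, (path.foldl (fun d p => d.modify p 0 (· + 1)) d1).getD v 0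
      = (List.count v path : Int) := by
    intro v
    rw [PySem.Dict.getD_foldl_modify_add_one, hzero1, zero_add]
  have hkeys_nodup : (path.foldl (fun d p => d.modify p 0 (· + 1)) d1).keys.Nodup := by
    rw [PySem.Dict.keys_foldl_modify]
    exact PySem.Set.nodup_update _ _ hnodup1
  have hmemkeys : ∀ e ∈ path, e ∈ (path.foldl (fun d p => d.modify p 0 (· + 1)) d1).keys := by
    intro e he
    rw [PySem.Dict.keys_foldl_modify]
    exact mem_update_of_mem_right _ _ _ he
  -- A's flag characterised
  have hflag : ((path.foldl (fun d p => d.modify p 0 (· + 1)) d1).items.foldl (fun acc kv =>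
        if pyIslower kv.1 && decide (2 ≤ kv.2) && !(kv.1 == "start") && !(kv.1 == "end")
        then true else acc) false) = true ↔
      ∃ e ∈ path, smallCond e = true ∧ 2 ≤ List.count e path := by
    rw [foldl_if_or, Bool.false_or,
        PySem.Dict.items_eq_map_keys _ hkeys_nodup 0, List.any_map, List.any_eq_true]
    constructor
    · rintro ⟨k, hk, hck⟩
      simp only [Function.comp, Bool.and_eq_true, decide_eq_true_eq, hcount,
        Bool.not_eq_eq_eq_not, Bool.not_true, beq_eq_false_iff_ne] at hck
      obtain ⟨⟨⟨hlow, h2⟩, hs⟩, he⟩ := hck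
      have h2' : 2 ≤ List.count k path := by exact_mod_cast h2
      have hkp : k ∈ path := List.count_pos_iff.1 (by omega)
      exact ⟨k, hkp, by simp [smallCond, hlow, hs, he], h2'⟩
    · rintro ⟨e, he, hc, h2⟩
      refine ⟨e, hmemkeys e he, ?_⟩
      simp only [smallCond, Bool.and_eq_true, Bool.not_eq_eq_eq_not, Bool.not_true,
        beq_eq_false_iff_ne] at hc
      simp only [Function.comp, Bool.and_eq_true, decide_eq_true_eq, hcount,
        Bool.not_eq_eq_eq_not, Bool.not_true, beq_eq_false_iff_ne]
      refine ⟨⟨⟨hc.1.1, ?_⟩, hc.1.2⟩, hc.2⟩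
      exact_mod_cast h2
  -- B's flag characterised
  have hB : ((path.foldl stepB (PySem.Set.empty, false)).2 = true ↔
      ∃ e ∈ path, smallCond e = true ∧ 2 ≤ List.count e path) := by
    rw [foldB_char]
    constructor
    · rintro (h | ⟨e, he, hc, hm⟩)
      · exact absurd h (by simp)
      · rcases hm with h | h
        · exact absurd h (List.not_mem_nil)
        · exact ⟨e, he, hc, h⟩
    · rintro ⟨e, he, hc, h⟩
      exact Or.inr ⟨e, he, hc, Or.inr h⟩
  have hflags : ((path.foldl (fun d p => d.modify p 0 (· + 1)) d1).items.foldl (fun acc kv =>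
        if pyIslower kv.1 && decide (2 ≤ kv.2) && !(kv.1 == "start") && !(kv.1 == "end")
        then true else acc) false) = (path.foldl stepB (PySem.Set.empty, false)).2 := by
    rw [Bool.eq_iff_iff, hflag, hB]
  rw [hcount, hflags]
  by_cases hx : x ∈ path
  · have hpos : 0 < List.count x path := List.count_pos_iff.2 hx
    have hne : ((List.count x path : Int) == 0) = false := by
      simp only [beq_eq_false_iff_ne, ne_eq]
      exact_mod_cast Nat.pos_iff_ne_zero.1 hpos
    have hge : decide ((1:Int) ≤ (List.count x path : Int)) = true := by
      simp only [decide_eq_true_eq]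
      exact_mod_cast hpos
    have hcontains : path.contains x = true := List.contains_iff_mem.2 hx
    rw [hne, hge]
    simp only [Bool.false_eq_true, if_false, if_true, hcontains, Bool.not_true]
    cases (path.foldl stepB (PySem.Set.empty, false)).2 <;> rfl
  · have h0 : List.count x path = 0 := List.count_eq_zero.2 hx
    have hcontains : path.contains x = false := by
      cases hcc : path.contains x
      · rfl
      · exact absurd (List.contains_iff_mem.1 hcc) hx
    have hz : ((List.count x path : Int) == 0) = true := by simp [h0]
    rw [hz, if_pos rfl, hcontains]
    rfl

-- discharge body2_core's hypotheses for A's actual initial dict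
theorem caveBody2A_eq (x : String) (path : List String) :
    caveBody2A x path =
      (if !(path.contains x) then some true
       else some (!(path.foldl stepB (PySem.Set.empty, false)).2)) := by
  have hzero0 : ∀ v, ((PySem.Set.ofList path).foldl (fun d e => d.insert e (0 : Int))
      PySem.Dict.empty).getD v 0 = 0 := by
    intro v
    exact getD_foldl_insert_zero _ PySem.Dict.empty (fun w => PySem.Dict.getD_empty ..) v
  have hnodup0 : ((PySem.Set.ofList path).foldl (fun d e => d.insert e (0 : Int))
      PySem.Dict.empty).keys.Nodup := by
    rw [PySem.Dict.keys_foldl_insert, PySem.Dict.keys_empty]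
    exact PySem.Set.nodup_update _ _ List.nodup_nil
  unfold caveBody2A
  refine body2_core x path _ ?_ ?_
  · intro v
    split
    · rw [PySem.Dict.getD_insert]
      split
      · rfl
      · exact hzero0 v
    · exact hzero0 v
  · split
    · exact PySem.Dict.nodup_keys_insert _ _ _ hnodup0
    · exact hnodup0

-- ===== VERDICT (by name: the statement is the Claim_ definition above) =====
theorem cave_not_been_visited_spec : Claim_equal_cave_not_been_visited := by
  intro x path part _
  unfold Spec_cave_not_been_visited cave_not_been_visited cave_not_been_visited_alt
  by_cases h1 : part = "Part 1"
  · subst h1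
    simp only [beq_self_eq_true, if_true,
      show (("Part 1" : String) == "Part 2") = false from rfl,
      Bool.false_eq_true, if_false, scanPathA_eq]
  · have h1' : (part == "Part 1") = false := by simpa using h1
    rw [h1']
    simp only [Bool.false_eq_true, if_false]
    by_cases h2 : part = "Part 2"
    · subst h2
      simp only [beq_self_eq_true, if_true]
      by_cases hu : pyIsupper x = true
      · simp [hu]
      · by_cases hl : pyIslower x = true
        · by_cases hse : (x == "start" || x == "end") = true
          · simp [hu, hl, hse, scanPathA_eq]
          · simp only [hu, hl, hse, Bool.false_eq_true, if_false, if_true]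
            rw [caveBody2A_eq]
        · simp [hu, hl]
    · have h2' : (part == "Part 2") = false := by simpa using h2
      rw [h2']
      simp only [Bool.false_eq_true, if_false]
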